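-- pv_equiv track=rewrite | github.com/nathanzhu144/practices | stack/1081_smallest_subseq_dist_chars.py | smallestSubsequence
-- ===== SOURCE A (Python) =====
-- def smallestSubsequence(text):
--     """
--     :type text: str
--     :rtype: str
--     """
--     table = dict()
--     for i, ch in enumerate(text):
--         table[ch] = i
--
--     stack = []
--     for i, ch in enumerate(text):
--         if ch in stack: continue # ch used already
--
--         # We need to check 3 conditions:
--         # 1. stack is not empty.
--         # 2. character is more optimal than whatever is on the stack rn.
--         # 3. the character we are about to pop hasn't had its last occurrence in text.ArithmeticError
--         while stack and ch < stack[-1] and i < table[stack[-1]]: stack.pop()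
--         stack.append(ch)
--
--     return "".join(stack)
-- ===== SOURCE B (Python) =====
-- def smallestSubsequence(text):
--     """
--     :type text: str
--     :rtype: str
--     """
--     if text == "":
--         return ""
--     last = {}
--     for i, ch in enumerate(text):
--         last[ch] = i
--     limit = min(last.values())
--     c = min(text[:limit + 1])
--     k = text.find(c)
--     rest = "".join(ch for ch in text[k + 1:] if ch != c)
--     return c + smallestSubsequence(rest)
-- ===== Notes on version B (the rewrite author's own statement) =====
-- stated objective: alternative
-- what changed: Replaces A's monotonic-stack scan (push each new character, popping larger stack tops that still reoccur later) by a recursive greedy: pick the lexicographically smallest character in text up to the earliest last-occurrence index, emit it, and recurse on the text after its first occurrence with all its copies removed.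
import Mathlib
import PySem

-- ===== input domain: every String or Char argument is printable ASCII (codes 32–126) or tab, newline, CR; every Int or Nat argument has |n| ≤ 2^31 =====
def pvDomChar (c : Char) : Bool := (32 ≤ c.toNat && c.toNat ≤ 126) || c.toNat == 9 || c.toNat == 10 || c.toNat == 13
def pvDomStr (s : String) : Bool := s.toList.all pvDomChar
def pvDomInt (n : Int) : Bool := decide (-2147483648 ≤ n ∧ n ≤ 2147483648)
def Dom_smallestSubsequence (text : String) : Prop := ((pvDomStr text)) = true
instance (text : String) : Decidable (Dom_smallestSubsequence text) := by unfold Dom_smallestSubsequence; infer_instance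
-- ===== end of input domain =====

-- B replaces A's monotonic-stack scan by a recursive greedy that picks the smallest
-- admissible first character and recurses on the stripped remainder (alternative
-- decomposition, not faster).

-- ===== PORT A =====
-- Both Pythons start by building the dict mapping each character to its last index
-- (A calls it `table`, B calls it `last`): the shared helper below is that loop.
def pvLastDict (cs : List Char) : PySem.Dict Char Int :=
  (PySem.List.enumerate cs).foldl (fun d p => d.insert p.2 p.1) PySem.Dict.empty

-- `while stack and ch < stack[-1] and i < table[stack[-1]]: stack.pop()`.
-- The stack is kept top-first (Python appends/pops at the END of the list), so
-- Python's stack[-1] is the head here and the final answer is `stack.reverse`.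
-- `table[stack[-1]]` is ported as getD _ 0; the KeyError branch is unreachable
-- (every character ever stacked was enumerated, hence is a key of `table`).
def pvPopA (table : PySem.Dict Char Int) (i : Int) (ch : Char) : List Char → List Char
  | [] => []
  | t :: s => if ch < t ∧ i < table.getD t 0 then pvPopA table i ch s else t :: s

def smallestSubsequence (text : String) : String :=
  let table := pvLastDict text.toList
  let stack :=
    (PySem.List.enumerate text.toList).foldl
      (fun s p => if p.2 ∈ s then s else p.2 :: pvPopA table p.1 p.2 s) ([] : List Char)
  String.ofList stack.reverse   -- "".join(stack)

-- ===== PORT B =====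
-- limit = min(last.values()); c = min(text[:limit+1]); k = text.find(c);
-- rest = "".join(ch for ch in text[k+1:] if ch != c)
def pvLimit (cs : List Char) : Int := (PySem.List.min? (pvLastDict cs).values id).getD 0

def pvC (cs : List Char) : Char :=
  (PySem.List.min? (PySem.List.slice cs none (some (pvLimit cs + 1))) id).getD ' '

def pvK (cs : List Char) : Int := PySem.Chars.find cs [pvC cs]

def pvRest (cs : List Char) : List Char :=
  (PySem.List.slice cs (some (pvK cs + 1)) none).filter (fun ch => ch != pvC cs)

-- termination helpers for the port (cited by decreasing_by below)
lemma pv_min?_isSome {α κ : Type} [LinearOrder κ] (xs : List α) (key : α → κ)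
    (h : xs ≠ []) : ∃ m, PySem.List.min? xs key = some m := by
  cases xs with
  | nil => exact absurd rfl h
  | cons x xs =>
    clear h
    show ∃ m, List.foldl _ none (x :: xs) = some m
    rw [List.foldl_cons]
    induction xs generalizing x with
    | nil => exact ⟨x, rfl⟩
    | cons y ys ih =>
      rw [List.foldl_cons]
      show ∃ m, List.foldl _ (if key y < key x then some y else some x) ys = some m
      split
      · exact ih y
      · exact ih x

lemma pvLastDict_values_nonneg (cs : List Char) {v : Int}
    (hv : v ∈ (pvLastDict cs).values) : 0 ≤ v := by
  have aux : ∀ (l : List Char) (n : Int) (d : PySem.Dict Char Int), 0 ≤ n →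
      (∀ w ∈ d.values, 0 ≤ w) →
      ∀ w ∈ ((PySem.List.enumerate l n).foldl (fun d p => d.insert p.2 p.1) d).values, 0 ≤ w := by
    intro l
    induction l with
    | nil => intro n d _ hd w hw; exact hd w (by simpa [PySem.List.enumerate] using hw)
    | cons a as ih =>
      intro n d hn hd w hw
      simp only [PySem.List.enumerate, List.foldl_cons] at hw
      refine ih (n+1) (d.insert a n) (by omega) ?_ w hw
      intro v hv
      rcases PySem.Dict.mem_values_insert _ _ _ _ hv with rfl | hv'
      · exact hn
      · exact hd v hv'
  exact aux cs 0 PySem.Dict.empty le_rfl (by simp [PySem.Dict.empty, PySem.Dict.values]) v hv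

lemma pvRest_lt (cs : List Char) (h : ¬ cs = []) : (pvRest cs).length < cs.length := by
  have hlim : 0 ≤ pvLimit cs := by
    unfold pvLimit
    cases hmv : PySem.List.min? (pvLastDict cs).values id with
    | none => simp
    | some v =>
      have hv : v ∈ (pvLastDict cs).values := PySem.List.min?_mem hmv
      simpa using pvLastDict_values_nonneg cs hv
  have hwin : PySem.List.slice cs none (some (pvLimit cs + 1)) = cs.take (pvLimit cs + 1).toNat :=
    PySem.List.slice_to cs (by omega)
  have hwne : cs.take (pvLimit cs + 1).toNat ≠ [] := by
    rw [ne_eq, List.take_eq_nil_iff]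
    push Not
    exact ⟨by omega, h⟩
  obtain ⟨c, hc⟩ := pv_min?_isSome (cs.take (pvLimit cs + 1).toNat) id hwne
  have hcC : pvC cs = c := by unfold pvC; rw [hwin, hc]; rfl
  have hcmem : c ∈ cs := List.take_subset _ _ (PySem.List.min?_mem hc)
  have hkpos : 0 ≤ pvK cs := by
    unfold pvK
    rw [hcC]
    exact (PySem.Chars.find_nonneg_iff cs [c]).2 ((List.singleton_infix_iff c cs).mpr hcmem)
  have hslice : PySem.List.slice cs (some (pvK cs + 1)) none = cs.drop (pvK cs + 1).toNat :=
    PySem.List.slice_from cs (by omega)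
  unfold pvRest
  rw [hslice]
  have hlen : 0 < cs.length := List.length_pos_of_ne_nil h
  have h1 : (cs.drop (pvK cs + 1).toNat).length < cs.length := by
    rw [List.length_drop]
    omega
  exact lt_of_le_of_lt (List.length_filter_le _ _) h1

def pvAltGo (cs : List Char) : List Char :=
  if h : cs = [] then [] else pvC cs :: pvAltGo (pvRest cs)
termination_by cs.length
decreasing_by exact pvRest_lt cs h

def smallestSubsequence_alt (text : String) : String := String.ofList (pvAltGo text.toList)

-- ===== PRECONDITION & SPEC =====
def Spec_smallestSubsequence (text : String) (out : String) : Prop := out = smallestSubsequence_alt text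
instance (text : String) (out : String) : Decidable (Spec_smallestSubsequence text out) := by unfold Spec_smallestSubsequence; infer_instance

-- ===== CLAIM (what is proved, stated in full; the proofs are below) =====
def Claim_equal_smallestSubsequence : Prop := ∀ (text : String), Dom_smallestSubsequence text → Spec_smallestSubsequence text (smallestSubsequence text)

-- ===== LEMMAS AND PROOFS =====

-- last occurrence index of x in cs (meaningful when x ∈ cs)
def pvLastOcc : List Char → Char → Nat
  | [], _ => 0
  | _ :: as, x => if x ∈ as then pvLastOcc as x + 1 else 0

lemma pvLastOcc_lt {cs : List Char} {x : Char} (h : x ∈ cs) : pvLastOcc cs x < cs.length := by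
  induction cs with
  | nil => simp at h
  | cons a as ih =>
    simp only [pvLastOcc]
    split
    · next hmem => simpa using ih hmem
    · simp

lemma getElem?_pvLastOcc {cs : List Char} {x : Char} (h : x ∈ cs) :
    cs[pvLastOcc cs x]? = some x := by
  induction cs with
  | nil => simp at h
  | cons a as ih =>
    simp only [pvLastOcc]
    split
    · next hmem => simpa using ih hmem
    · next hmem =>
      have hxa : x = a := by rcases List.mem_cons.1 h with h' | h' <;> simp_all
      simp [hxa]

lemma pvLastOcc_not_mem_drop (cs : List Char) (x : Char) :
    x ∉ cs.drop (pvLastOcc cs x + 1) := by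
  induction cs with
  | nil => simp
  | cons a as ih =>
    simp only [pvLastOcc]
    split
    · next hmem => simpa using ih
    · simpa using (by assumption : x ∉ as)

lemma mem_drop_iff_le_pvLastOcc {cs : List Char} {x : Char} (h : x ∈ cs) (j : Nat) :
    x ∈ cs.drop j ↔ j ≤ pvLastOcc cs x := by
  constructor
  · intro hj
    by_contra hlt
    push Not at hlt
    have hsub : cs.drop j ⊆ cs.drop (pvLastOcc cs x + 1) := by
      have : cs.drop j = (cs.drop (pvLastOcc cs x + 1)).drop (j - (pvLastOcc cs x + 1)) := by
        rw [List.drop_drop]; congr 1; omega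
      rw [this]; exact List.drop_subset _ _
    exact pvLastOcc_not_mem_drop cs x (hsub hj)
  · intro hj
    have h1 : cs[pvLastOcc cs x]? = some x := getElem?_pvLastOcc h
    have h2 : (cs.drop j)[pvLastOcc cs x - j]? = some x := by
      rw [List.getElem?_drop]
      rw [show j + (pvLastOcc cs x - j) = pvLastOcc cs x by omega]
      exact h1
    exact List.mem_of_getElem? h2

lemma pvLastDict_getD_aux (cs : List Char) (n : Int) (d : PySem.Dict Char Int)
    (x : Char) (dflt : Int) :
    ((PySem.List.enumerate cs n).foldl (fun d p => d.insert p.2 p.1) d).getD x dflt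
      = if x ∈ cs then n + (pvLastOcc cs x : Int) else d.getD x dflt := by
  induction cs generalizing n d with
  | nil => simp [PySem.List.enumerate]
  | cons a as ih =>
    simp only [PySem.List.enumerate, List.foldl_cons]
    rw [ih]
    by_cases hx : x ∈ as
    · simp only [hx, if_true, List.mem_cons, or_true, pvLastOcc]
      push_cast
      ring
    · simp only [hx, if_false]
      by_cases hxa : x = a
      · subst hxa
        rw [PySem.Dict.getD_insert_self]
        simp [pvLastOcc, hx]
      · rw [PySem.Dict.getD_insert_of_ne _ _ _ hxa]
        simp [hx, hxa]

lemma pvLastDict_getD (cs : List Char) (x : Char) (dflt : Int) :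
    (pvLastDict cs).getD x dflt
      = if x ∈ cs then (pvLastOcc cs x : Int) else dflt := by
  have := pvLastDict_getD_aux cs 0 PySem.Dict.empty x dflt
  simpa [pvLastDict, PySem.Dict.getD_empty] using this

lemma pvEnum_map_snd (cs : List Char) (n : Int) :
    (PySem.List.enumerate cs n).map (·.2) = cs := by
  induction cs generalizing n with
  | nil => simp [PySem.List.enumerate]
  | cons a as ih => simp [PySem.List.enumerate, ih]

lemma pvLastDict_values (cs : List Char) :
    (pvLastDict cs).values = (PySem.Set.ofList cs).map (fun x => (pvLastOcc cs x : Int)) := by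
  have hnd : (pvLastDict cs).keys.Nodup := by
    exact PySem.Dict.nodup_keys_foldl_insert_key (PySem.List.enumerate cs)
      (fun p => p.2) (fun _ p => p.1) PySem.Dict.empty PySem.Dict.nodup_keys_empty
  have hkeys : (pvLastDict cs).keys = PySem.Set.ofList cs := by
    have h1 := PySem.Dict.keys_foldl_insert_key (PySem.List.enumerate cs)
      (fun p => p.2) (fun _ p => p.1) PySem.Dict.empty
    have h2 : PySem.Set.update (PySem.Dict.empty : PySem.Dict Char Int).keys ((PySem.List.enumerate cs).map (fun p => p.2))
        = PySem.Set.ofList cs := by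
      rw [show ((PySem.List.enumerate cs).map (fun p => p.2)) = cs from pvEnum_map_snd cs 0]
      simp [PySem.Dict.keys_empty, PySem.Set.update_nil_left]
    exact h1.trans h2
  rw [PySem.Dict.values_eq_map_keys _ hnd 0, hkeys]
  refine List.map_congr_left ?_
  intro x hx
  have : x ∈ cs := (PySem.Set.mem_ofList cs x).1 hx
  rw [pvLastDict_getD, if_pos this]

-- the facts about limit / c / k that the equivalence proof uses
lemma pvStep (cs : List Char) (h : cs ≠ []) :
    ∃ (m k : Nat) (c : Char),
      pvC cs = c ∧
      pvRest cs = (cs.drop (k+1)).filter (fun t => t != c) ∧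
      k ≤ m ∧ m < cs.length ∧ k < cs.length ∧
      cs[k]? = some c ∧
      c ∉ cs.take k ∧
      (∀ x ∈ cs.take (m+1), c ≤ x) ∧
      (∀ x ∈ cs, x ∈ cs.drop m) ∧
      (∀ e, cs[m]? = some e → e ∉ cs.drop (m+1)) := by
  have hvals := pvLastDict_values cs
  have hone : (PySem.Set.ofList cs : List Char) ≠ [] := by
    cases cs with
    | nil => exact absurd rfl h
    | cons a as =>
      intro hh
      have ha : a ∈ PySem.Set.ofList (a :: as) := (PySem.Set.mem_ofList _ _).2 (by simp)
      rw [hh] at ha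
      simp at ha
  obtain ⟨v, hv⟩ := pv_min?_isSome (pvLastDict cs).values id (by rw [hvals]; simpa using hone)
  have hvmem := PySem.List.min?_mem hv
  rw [hvals] at hvmem
  obtain ⟨e, he_mem, he_eq⟩ := List.mem_map.1 hvmem
  have he_cs : e ∈ cs := (PySem.Set.mem_ofList _ _).1 he_mem
  set m := pvLastOcc cs e with hm
  have hlim : pvLimit cs = (m : Int) := by
    unfold pvLimit
    rw [hv]
    simp [← he_eq]
  have hmlt : m < cs.length := pvLastOcc_lt he_cs
  have hmin : ∀ x ∈ cs, m ≤ pvLastOcc cs x := by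
    intro x hx
    have hxv : (pvLastOcc cs x : Int) ∈ (pvLastDict cs).values := by
      rw [hvals]
      exact List.mem_map.2 ⟨x, (PySem.Set.mem_ofList _ _).2 hx, rfl⟩
    have := PySem.List.min?_isMin hv _ hxv
    simp only [id] at this
    omega
  have hF1 : ∀ x ∈ cs, x ∈ cs.drop m := fun x hx => (mem_drop_iff_le_pvLastOcc hx m).2 (hmin x hx)
  have hgm : cs[m]? = some e := getElem?_pvLastOcc he_cs
  have hF2 : ∀ e', cs[m]? = some e' → e' ∉ cs.drop (m+1) := by
    intro e' he'
    rw [hgm, Option.some_inj] at he'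
    exact he' ▸ pvLastOcc_not_mem_drop cs e
  -- window
  have hwin : PySem.List.slice cs none (some (pvLimit cs + 1)) = cs.take (m+1) := by
    rw [PySem.List.slice_to cs (by rw [hlim]; omega)]
    congr 1
    rw [hlim]
    omega
  have hwne : cs.take (m+1) ≠ [] := by
    rw [ne_eq, List.take_eq_nil_iff]
    push Not
    exact ⟨by omega, h⟩
  obtain ⟨c, hc⟩ := pv_min?_isSome (cs.take (m+1)) id hwne
  have hcC : pvC cs = c := by unfold pvC; rw [hwin, hc]; rfl
  have hcwin : c ∈ cs.take (m+1) := PySem.List.min?_mem hc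
  have hW1 : ∀ x ∈ cs.take (m+1), c ≤ x := by
    intro x hx
    have := PySem.List.min?_isMin hc _ hx
    simpa using this
  have hccs : c ∈ cs := List.take_subset _ _ hcwin
  -- k
  have hkge : 0 ≤ pvK cs := by
    unfold pvK
    rw [hcC]
    exact (PySem.Chars.find_nonneg_iff cs [c]).2 ((List.singleton_infix_iff c cs).mpr hccs)
  have hkfind : pvK cs = PySem.Chars.find cs [c] := by unfold pvK; rw [hcC]
  have hspec := PySem.Chars.find_spec (s := cs) (sub := [c]) (by rw [← hkfind]; exact hkge)
  rw [← hkfind] at hspec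
  obtain ⟨hpre, hminI⟩ := hspec
  set kn := (pvK cs).toNat with hkn
  obtain ⟨t, ht⟩ := hpre
  simp only [List.singleton_append] at ht
  have hklt : kn < cs.length := by
    have := congrArg List.length ht
    rw [List.length_drop] at this
    simp only [List.length_cons] at this
    omega
  have hgk : cs[kn]? = some c := by
    have h0 : (cs.drop kn)[0]? = some c := by rw [← ht]; rfl
    rw [List.getElem?_drop] at h0
    simpa using h0
  have hnotake : c ∉ cs.take kn := by
    intro hmem
    obtain ⟨j, hj, hje⟩ := List.getElem_of_mem hmem
    rw [List.length_take] at hj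
    have hje' : cs[j]'(by omega) = c := by rw [← hje]; exact (List.getElem_take).symm
    refine hminI j (by omega) ⟨cs.drop (j+1), ?_⟩
    simp only [List.singleton_append]
    rw [← hje']
    exact List.getElem_cons_drop (show j < cs.length by omega)
  have hkm : kn ≤ m := by
    obtain ⟨j, hj, hje⟩ := List.getElem_of_mem hcwin
    rw [List.length_take] at hj
    have hje' : cs[j]'(by omega) = c := by rw [← hje]; exact (List.getElem_take).symm
    by_contra hlt
    refine hminI j (by omega) ⟨cs.drop (j+1), ?_⟩
    simp only [List.singleton_append]
    rw [← hje']
    exact List.getElem_cons_drop (show j < cs.length by omega)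
  have hrest : pvRest cs = (cs.drop (kn+1)).filter (fun t => t != c) := by
    unfold pvRest
    rw [PySem.List.slice_from cs (by omega), hcC]
    congr 2
    omega
  exact ⟨m, kn, c, hcC, hrest, hkm, hmlt, hklt, hgk, hnotake, hW1, hF1, hF2⟩

-- the A-side loop, rephrased: pop while the top is bigger and reoccurs in the rest
def pvPopW (rest : List Char) (ch : Char) : List Char → List Char
  | [] => []
  | t :: s => if ch < t ∧ t ∈ rest then pvPopW rest ch s else t :: s

def pvExec : List Char → List Char → List Char
  | [], s => s
  | ch :: rest, s => if ch ∈ s then pvExec rest s else pvExec rest (ch :: pvPopW rest ch s)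

-- the same loop with an explicit future list appended to every rest
def pvExecP : List Char → List Char → List Char → List Char
  | [], _, s => s
  | ch :: xs, ys, s =>
      if ch ∈ s then pvExecP xs ys s else pvExecP xs ys (ch :: pvPopW (xs ++ ys) ch s)

lemma pvExecP_nil (xs : List Char) (s : List Char) : pvExecP xs [] s = pvExec xs s := by
  induction xs generalizing s with
  | nil => rfl
  | cons ch xs ih =>
    simp only [pvExecP, pvExec, List.append_nil]
    split <;> rw [ih]

lemma pvExecP_append (xs ys zs s : List Char) :
    pvExecP (xs ++ ys) zs s = pvExecP ys zs (pvExecP xs (ys ++ zs) s) := by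
  induction xs generalizing s with
  | nil => rfl
  | cons ch xs ih =>
    simp only [pvExecP, List.cons_append, List.append_assoc]
    split <;> rw [ih]

lemma pvPopW_subset {rest : List Char} {ch : Char} {s : List Char} {t : Char}
    (h : t ∈ pvPopW rest ch s) : t ∈ s := by
  induction s with
  | nil => simp [pvPopW] at h
  | cons t' s ih =>
    simp only [pvPopW] at h
    split at h
    · exact List.mem_cons_of_mem _ (ih h)
    · exact h

lemma pvPopW_all (rest : List Char) (ch : Char) (s : List Char)
    (h : ∀ t ∈ s, ch < t ∧ t ∈ rest) : pvPopW rest ch s = [] := by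
  induction s with
  | nil => rfl
  | cons t s ih =>
    have ht := h t (by simp)
    simp only [pvPopW, if_pos ht]
    exact ih (fun u hu => h u (by simp [hu]))

lemma pvPopW_congr {r1 r2 : List Char} (ch : Char) (s : List Char)
    (h : ∀ t ∈ s, (t ∈ r1 ↔ t ∈ r2)) : pvPopW r1 ch s = pvPopW r2 ch s := by
  induction s with
  | nil => rfl
  | cons t s ih =>
    have ht := h t (by simp)
    simp only [pvPopW, ht]
    split
    · exact ih (fun u hu => h u (by simp [hu]))
    · rfl

lemma pvPopW_append_sing {rest : List Char} {ch c : Char} (s : List Char)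
    (h : ¬ (ch < c ∧ c ∈ rest)) :
    pvPopW rest ch (s ++ [c]) = pvPopW rest ch s ++ [c] := by
  induction s with
  | nil => simp [pvPopW, h]
  | cons t s ih =>
    simp only [List.cons_append, pvPopW]
    split
    · exact ih
    · rfl

lemma pvPopW_blocked {rest : List Char} {ch d : Char} {s : List Char}
    (hd : d ∈ s) (hnot : d ∉ rest) : d ∈ pvPopW rest ch s := by
  induction s with
  | nil => simp at hd
  | cons t s ih =>
    simp only [pvPopW]
    split
    · next hc =>
      rcases List.mem_cons.1 hd with rfl | hd'
      · exact absurd hc.2 hnot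
      · exact ih hd'
    · exact hd

lemma pvPopW_append_ne_nil {rest : List Char} {ch c : Char} {s : List Char}
    (h : pvPopW rest ch s ≠ []) :
    pvPopW rest ch (s ++ [c]) = pvPopW rest ch s ++ [c] := by
  induction s with
  | nil => simp [pvPopW] at h
  | cons t s ih =>
    simp only [List.cons_append, pvPopW] at h ⊢
    split
    · next hc =>
      rw [if_pos hc] at h
      exact ih h
    · rfl

lemma pvExecP_mem {xs ys s : List Char} {t : Char}
    (h : t ∈ pvExecP xs ys s) : t ∈ s ∨ t ∈ xs := by
  induction xs generalizing s with
  | nil => exact Or.inl h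
  | cons ch xs ih =>
    simp only [pvExecP] at h
    split at h
    · rcases ih h with h' | h'
      · exact Or.inl h'
      · exact Or.inr (List.mem_cons_of_mem _ h')
    · rcases ih h with h' | h'
      · rcases List.mem_cons.1 h' with rfl | h''
        · exact Or.inr (List.mem_cons_self)
        · exact Or.inl (pvPopW_subset h'')
      · exact Or.inr (List.mem_cons_of_mem _ h')

-- phase-1 certificate: some position j such that everything up to j is ≥ c and the
-- character at j occurs for the last time there
def pvPh1 (c : Char) (N : List Char) : Prop :=
  ∃ j, ∃ _ : j < N.length, (∀ t ∈ N.take (j+1), c ≤ t) ∧ N[j] ∉ N.drop (j+1)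

lemma pvPh1_cons {c ch : Char} {N : List Char} (h : pvPh1 c (ch :: N)) :
    c ≤ ch ∧ (ch ∉ N ∨ pvPh1 c N) := by
  obtain ⟨j, hj, hle, hlast⟩ := h
  refine ⟨hle ch (by simp), ?_⟩
  cases j with
  | zero => exact Or.inl (by simpa using hlast)
  | succ j' =>
    refine Or.inr ⟨j', by simpa using hj, ?_, ?_⟩
    · intro t ht
      exact hle t (by simp [List.take_succ_cons]; right; exact ht)
    · simpa using hlast

-- the bottom-of-stack character c is never popped: the invariant argument
lemma pvExecC (c : Char) : ∀ (N s' : List Char), c ∉ s' →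
    (c ∈ N → (∃ d ∈ s', d ∉ N) ∨ pvPh1 c N) →
    pvExec N (s' ++ [c]) = pvExec (N.filter (fun t => t != c)) s' ++ [c] := by
  intro N
  induction N with
  | nil => intro s' _ _; simp [pvExec]
  | cons ch N ih =>
    intro s' hcs hinv
    by_cases hchc : ch = c
    · subst hchc
      simp only [pvExec, List.filter_cons, bne_self_eq_false, if_neg (by simp : ¬ (false = true))]
      rw [if_pos (by simp : ch ∈ s' ++ [ch])]
      refine ih s' hcs ?_
      intro hcN
      rcases hinv (by simp) with ⟨d, hd, hdn⟩ | hph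
      · exact Or.inl ⟨d, hd, fun hh => hdn (List.mem_cons_of_mem _ hh)⟩
      · rcases (pvPh1_cons hph).2 with hno | hph'
        · exact absurd hcN hno
        · exact Or.inr hph'
    · have hchc' : (ch != c) = true := by simp [hchc]
      by_cases hchs : ch ∈ s'
      · simp only [List.filter_cons, hchc', if_true]
        simp only [pvExec]
        rw [if_pos (by simp [hchs] : ch ∈ s' ++ [c]), if_pos hchs]
        refine ih s' hcs ?_
        intro hcN
        rcases hinv (by simp [hcN]) with ⟨d, hd, hdn⟩ | hph
        · exact Or.inl ⟨d, hd, fun hh => hdn (List.mem_cons_of_mem _ hh)⟩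
        · rcases (pvPh1_cons hph).2 with hno | hph'
          · exact Or.inl ⟨ch, hchs, hno⟩
          · exact Or.inr hph'
      · have hpop : pvPopW N ch (s' ++ [c]) = pvPopW N ch s' ++ [c] := by
          by_cases hcN : c ∈ N
          · rcases hinv (by simp [hcN]) with ⟨d, hd, hdn⟩ | hph
            · refine pvPopW_append_ne_nil (fun hnil => ?_)
              have hblk := pvPopW_blocked (rest := N) (ch := ch)
                hd (fun hh => hdn (List.mem_cons_of_mem _ hh))
              rw [hnil] at hblk
              simp at hblk
            · have hle := (pvPh1_cons hph).1
              refine pvPopW_append_sing s' (fun hc2 => ?_)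
              exact absurd (lt_of_le_of_lt hle hc2.1) (lt_irrefl _)
          · exact pvPopW_append_sing s' (fun hc2 => hcN hc2.2)
        have hcong : pvPopW (N.filter (fun t => t != c)) ch s' = pvPopW N ch s' := by
          refine pvPopW_congr ch s' (fun t ht => ?_)
          have htc : t ≠ c := fun hh => hcs (hh ▸ ht)
          simp [List.mem_filter, htc]
        simp only [List.filter_cons, hchc', if_true]
        simp only [pvExec]
        rw [if_neg (by simp [hchs, hchc] : ¬ ch ∈ s' ++ [c]), if_neg hchs]
        rw [hpop, hcong, show ch :: (pvPopW N ch s' ++ [c]) = (ch :: pvPopW N ch s') ++ [c] from rfl]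
        have hnot : c ∉ ch :: pvPopW N ch s' := by
          intro hh
          rcases List.mem_cons.1 hh with hh' | hh'
          · exact hchc hh'.symm
          · exact hcs (pvPopW_subset hh')
        refine ih (ch :: pvPopW N ch s') hnot ?_
        intro hcN
        rcases hinv (by simp [hcN]) with ⟨d, hd, hdn⟩ | hph
        · have hdn' : d ∉ N := fun hh => hdn (List.mem_cons_of_mem _ hh)
          exact Or.inl ⟨d, List.mem_cons_of_mem _ (pvPopW_blocked hd hdn'), hdn'⟩
        · rcases (pvPh1_cons hph).2 with hno | hph'
          · exact Or.inl ⟨ch, List.mem_cons_self, hno⟩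
          · exact Or.inr hph'


-- one greedy step of the stack machine
lemma pvExec_step (cs : List Char) (h : cs ≠ []) :
    pvExec cs [] = pvExec (pvRest cs) [] ++ [pvC cs] := by
  obtain ⟨m, k, c, hcC, hrest, hkm, hmlt, hklt, hgk, hnok, hW1, hF1, hF2⟩ := pvStep cs h
  rw [hcC, hrest]
  have hget : cs[k]'hklt = c := by
    have := List.getElem?_eq_getElem (l := cs) (i := k) hklt
    rw [hgk] at this
    exact (Option.some_inj.1 this).symm
  have hdk : cs.drop k = c :: cs.drop (k+1) := by
    rw [← hget]
    exact (List.getElem_cons_drop hklt).symm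
  set M := cs.drop (k+1) with hM
  set P := cs.take k with hP
  have hsplit : cs = P ++ (c :: M) := by
    conv_lhs => rw [← List.take_append_drop k cs]
    rw [hdk]
  have hPel : ∀ t ∈ P, c < t ∧ t ∈ M := by
    intro t ht
    have htc : t ≠ c := fun hh => hnok (hh ▸ ht)
    have htwin : t ∈ cs.take (m+1) := by
      have hsub : P ⊆ cs.take (m+1) := by
        rw [hP, show cs.take k = (cs.take (m+1)).take k from by
          rw [List.take_take]; congr 1; omega]
        exact List.take_subset _ _
      exact hsub ht
    refine ⟨lt_of_le_of_ne (hW1 t htwin) (Ne.symm htc), ?_⟩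
    have htcs : t ∈ cs := List.take_subset _ _ ht
    have hdm : t ∈ cs.drop m := hF1 t htcs
    rcases Nat.eq_or_lt_of_le hkm with heq | hlt
    · rw [← heq, hdk] at hdm
      rcases List.mem_cons.1 hdm with hh | hh
      · exact absurd hh htc
      · exact hh
    · have hsub : cs.drop m ⊆ M := by
        rw [hM, show cs.drop m = (cs.drop (k+1)).drop (m - (k+1)) from by
          rw [List.drop_drop]; congr 1; omega]
        exact List.drop_subset _ _
      exact hsub hdm
  have hph : c ∈ M → pvPh1 c M := by
    intro hcM
    have hmk : k < m := by
      rcases Nat.eq_or_lt_of_le hkm with heq | hlt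
      · exfalso
        have h2 := hF2 c (by rw [← heq]; exact hgk)
        rw [← heq] at h2
        exact h2 hcM
      · exact hlt
    have hj : m - (k+1) < M.length := by rw [hM, List.length_drop]; omega
    refine ⟨m - (k+1), hj, ?_, ?_⟩
    · intro t ht
      refine hW1 t ?_
      rw [hM, List.take_drop] at ht
      rw [show k + 1 + (m - (k+1) + 1) = m + 1 by omega] at ht
      exact List.drop_subset _ _ ht
    · have hMg : M[m - (k+1)]'hj = cs[m]'hmlt := by
        simp only [hM, List.getElem_drop]
        congr 1
        omega
      rw [hMg, hM, List.drop_drop, show k + 1 + (m - (k+1) + 1) = m + 1 by omega]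
      exact hF2 _ (List.getElem?_eq_getElem hmlt)
  calc pvExec cs []
      = pvExecP cs [] [] := (pvExecP_nil cs []).symm
    _ = pvExecP (P ++ (c :: M)) [] [] := by rw [← hsplit]
    _ = pvExecP (c :: M) [] (pvExecP P ((c :: M) ++ []) []) := pvExecP_append P (c::M) [] []
    _ = pvExecP (c :: M) [] (pvExecP P (c :: M) []) := by rw [List.append_nil]
    _ = pvExec (M.filter (fun t => t != c)) [] ++ [c] := by
        set S := pvExecP P (c :: M) [] with hSdef
        have hS : ∀ t ∈ S, c < t ∧ t ∈ M := by
          intro t ht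
          rcases pvExecP_mem ht with h' | h'
          · simp at h'
          · exact hPel t h'
        have hcS : c ∉ S := fun hh => absurd (hS c hh).1 (lt_irrefl c)
        rw [pvExecP, if_neg hcS, List.append_nil, pvPopW_all M c S hS, pvExecP_nil]
        have hC := pvExecC c M [] (by simp) (fun hcM => Or.inr (hph hcM))
        simpa using hC

theorem pvCore (cs : List Char) : (pvExec cs []).reverse = pvAltGo cs := by
  have H : ∀ n (cs : List Char), cs.length ≤ n → (pvExec cs []).reverse = pvAltGo cs := by
    intro n
    induction n with
    | zero =>
      intro cs hlen
      have hnil : cs = [] := List.eq_nil_of_length_eq_zero (by omega)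
      subst hnil
      simp [pvExec, pvAltGo]
    | succ n ih =>
      intro cs hlen
      by_cases h : cs = []
      · subst h; simp [pvExec, pvAltGo]
      · rw [pvExec_step cs h, List.reverse_append, pvAltGo, dif_neg h]
        rw [ih (pvRest cs) (by have := pvRest_lt cs h; omega)]
        rfl
  exact H cs.length cs le_rfl

-- bridge from port A's indexed loop to pvExec
lemma pvPopA_eq (cs : List Char) (n : Nat) (ch : Char) (s : List Char)
    (hs : ∀ t ∈ s, t ∈ cs) :
    pvPopA (pvLastDict cs) (n : Int) ch s = pvPopW (cs.drop (n+1)) ch s := by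
  induction s with
  | nil => rfl
  | cons t s ih =>
    have htcs : t ∈ cs := hs t (by simp)
    have hcond : ((n:Int) < (pvLastDict cs).getD t 0) ↔ (t ∈ cs.drop (n+1)) := by
      rw [pvLastDict_getD, if_pos htcs, mem_drop_iff_le_pvLastOcc htcs]
      omega
    simp only [pvPopA, pvPopW]
    by_cases hlt : ch < t
    · by_cases hmem : t ∈ cs.drop (n+1)
      · rw [if_pos ⟨hlt, hcond.2 hmem⟩, if_pos ⟨hlt, hmem⟩]
        exact ih (fun u hu => hs u (by simp [hu]))
      · rw [if_neg (fun hc => hmem (hcond.1 hc.2)), if_neg (fun hc => hmem hc.2)]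
    · rw [if_neg (fun hc => hlt hc.1), if_neg (fun hc => hlt hc.1)]

lemma pvExecA (cs : List Char) : ∀ (fuel n : Nat) (s : List Char), cs.length - n ≤ fuel →
    (∀ t ∈ s, t ∈ cs) →
    ((PySem.List.enumerate (cs.drop n) (n : Int)).foldl
        (fun s p => if p.2 ∈ s then s else p.2 :: pvPopA (pvLastDict cs) p.1 p.2 s) s)
      = pvExec (cs.drop n) s := by
  intro fuel
  induction fuel with
  | zero =>
    intro n s hlen hs
    rw [List.drop_eq_nil_of_le (by omega)]
    simp [PySem.List.enumerate, pvExec]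
  | succ fuel ih =>
    intro n s hlen hs
    cases hd : cs.drop n with
    | nil => simp [PySem.List.enumerate, pvExec]
    | cons ch suf =>
      have hlt : n < cs.length := by
        by_contra hh
        push Not at hh
        rw [List.drop_eq_nil_of_le hh] at hd
        simp at hd
      have hd1 : cs.drop (n+1) = suf := by
        have h2 : cs.drop (n+1) = (cs.drop n).drop 1 := by rw [List.drop_drop]
        rw [h2, hd, List.drop_one, List.tail_cons]
      simp only [PySem.List.enumerate, List.foldl_cons]
      show (PySem.List.enumerate suf ((n:Int)+1)).foldl _
          (if ch ∈ s then s else ch :: pvPopA (pvLastDict cs) (n:Int) ch s) = _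
      rw [show ((n:Int)+1) = ((n+1:Nat) : Int) by push_cast; ring]
      rw [pvPopA_eq cs n ch s hs, hd1]
      by_cases hm : ch ∈ s
      · rw [if_pos hm]
        have hih := ih (n+1) s (by omega) hs
        rw [hd1] at hih
        rw [hih, pvExec, if_pos hm]
      · rw [if_neg hm]
        have hs' : ∀ t ∈ ch :: pvPopW suf ch s, t ∈ cs := by
          intro t ht
          rcases List.mem_cons.1 ht with rfl | ht'
          · exact List.drop_subset _ _ (hd ▸ List.mem_cons_self)
          · exact hs t (pvPopW_subset ht')
        have hih := ih (n+1) (ch :: pvPopW suf ch s) (by omega) hs'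
        rw [hd1] at hih
        rw [hih, pvExec, if_neg hm]

-- ===== VERDICT (by name: the statement is the Claim_ definition above) =====
theorem smallestSubsequence_spec : Claim_equal_smallestSubsequence := by
  intro text _
  unfold Spec_smallestSubsequence smallestSubsequence smallestSubsequence_alt
  have h := pvExecA text.toList text.toList.length 0 [] (by omega) (by simp)
  simp only [List.drop_zero, Int.natCast_zero] at h
  simp only [h, pvCore]
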